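-- pv_equiv track=rewrite | github.com/varun1414/Tweetify-1 | backend/django_app/prediction/ML_product.py | count
-- ===== SOURCE A (Python) =====
-- def count(label):
--     pos=0
--     neg=0
--     neu=0
--     for i in label:
--         if i==1:
--             pos=pos+1
--         elif i==0:
--             neu=neu+1
--         else:
--             neg=neg+1
--     return pos,neg,neu
-- ===== SOURCE B (Python) =====
-- def count(label):
--     # Staged passes: count each bucket over the whole list, derive neg arithmetically.
--     pos = label.count(1)
--     neu = label.count(0)
--     neg = len(label) - pos - neu
--     return pos, neg, neu
-- ===== Notes on version B (the rewrite author's own statement) =====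
-- stated objective: idiomatic
-- what changed: Replaces A's single loop with three-way if/elif/else accumulation by staged whole-list passes (label.count(1), label.count(0), len) with the negative bucket derived arithmetically as len - pos - neu; no per-element branching or accumulator state remains.
import Mathlib
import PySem

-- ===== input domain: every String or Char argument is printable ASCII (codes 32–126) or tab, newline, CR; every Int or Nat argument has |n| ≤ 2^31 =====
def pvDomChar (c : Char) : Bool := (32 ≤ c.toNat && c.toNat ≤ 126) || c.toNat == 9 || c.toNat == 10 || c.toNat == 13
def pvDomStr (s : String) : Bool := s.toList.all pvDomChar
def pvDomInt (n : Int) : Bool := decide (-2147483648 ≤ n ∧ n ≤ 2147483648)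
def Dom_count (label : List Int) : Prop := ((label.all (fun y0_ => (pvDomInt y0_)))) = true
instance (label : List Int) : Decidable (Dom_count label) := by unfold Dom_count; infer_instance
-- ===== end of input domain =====

-- B replaces A's branchy accumulator loop by staged whole-list counting passes
-- (count of 1s, count of 0s, length) with the negative bucket derived arithmetically (idiomatic, same cost).


-- ===== PORT A =====
def count (label : List Int) : Int × Int × Int :=
  let s := label.foldl (fun s i =>
    if i = 1 then (s.1 + 1, s.2.1, s.2.2)
    else if i = 0 then (s.1, s.2.1, s.2.2 + 1)
    else (s.1, s.2.1 + 1, s.2.2)) ((0 : Int), (0 : Int), (0 : Int))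
  (s.1, s.2.1, s.2.2)

-- ===== PORT B =====
def count_alt (label : List Int) : Int × Int × Int :=
  let pos := PySem.List.count label 1
  let neu := PySem.List.count label 0
  let neg := (label.length : Int) - pos - neu
  (pos, neg, neu)

-- ===== PRECONDITION & SPEC =====
def Spec_count (label : List Int) (out : Int × Int × Int) : Prop := out = count_alt label
instance (label : List Int) (out : Int × Int × Int) : Decidable (Spec_count label out) := by unfold Spec_count; infer_instance

-- ===== CLAIM (what is proved, stated in full; the proofs are below) =====
def Claim_equal_count : Prop := ∀ (label : List Int), Dom_count label → Spec_count label (count label)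

-- ===== LEMMAS AND PROOFS =====

theorem count_foldA (l : List Int) (p n u : Int) :
    l.foldl (fun s i =>
      if i = 1 then (s.1 + 1, s.2.1, s.2.2)
      else if i = 0 then (s.1, s.2.1, s.2.2 + 1)
      else (s.1, s.2.1 + 1, s.2.2)) (p, n, u)
    = (p + l.count 1, n + ((l.length : Int) - l.count 1 - l.count 0), u + l.count 0) := by
  induction l generalizing p n u with
  | nil => simp
  | cons x t ih =>
    simp only [List.foldl_cons, List.count_cons, List.length_cons]
    by_cases h1 : x = 1
    · subst h1; simp [ih]; omega
    · by_cases h0 : x = 0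
      · subst h0; simp [ih, h1]; omega
      · simp [ih, h1, h0]; omega

-- ===== VERDICT (by name: the statement is the Claim_ definition above) =====
theorem count_spec : Claim_equal_count := by
  intro label _
  unfold Spec_count count count_alt
  simp only [count_foldA, PySem.List.count_eq, Prod.mk.injEq]
  omega
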